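-- pv_equiv track=rewrite | github.com/aditi-tiwary/100-Day-Coding-Sprint | Day02/Pair of Subarrays.py | calculate_pairs
-- ===== SOURCE A (Python) =====
-- def calculate_pairs(n, arr):
--     """
--     Counts the number of unique pairs of non-overlapping subarrays
--     with the same sum.
--     """
--     from collections import defaultdict
--     import bisect
--
--     # Map to store the (start, end) indices for every subarray sum found
--     # Key: sum, Value: list of tuples (start_index, end_index)
--     sum_intervals = defaultdict(list)
--
--     # O(N^2) complexity to find all subarrays.
--     # Note: For N=10^6, this is theoretically too slow for a standard time limit.
--     # This logic assumes N is smaller or the test cases allow for subarray processing.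
--     for i in range(n):
--         current_sum = 0
--         for j in range(i, n):
--             current_sum += arr[j]
--             # Using 1-based indexing as per problem statement
--             sum_intervals[current_sum].append((i + 1, j + 1))
--
--     total_count = 0
--
--     # For each unique sum, count non-overlapping pairs
--     for s in sum_intervals:
--         intervals = sum_intervals[s]
--         if len(intervals) < 2:
--             continue
--
--         # Sort intervals by start index to allow efficient counting
--         intervals.sort()
--
--         # Extract all end indices and sort them to use binary search
--         all_ends = sorted([inter[1] for inter in intervals])
--
--         for start, end in intervals:
--             # For the current subarray starting at 'start', we want to count
--             # how many other subarrays with the same sum ended before 'start'.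
--             # These are the non-overlapping pairs where the other subarray
--             # comes first.
--
--             # Find number of end indices < current start index
--             count = bisect.bisect_left(all_ends, start)
--             total_count += count
--
--     return total_count
-- ===== SOURCE B (Python) =====
-- def calculate_pairs(n, arr):
--     """
--     Counts pairs of non-overlapping equal-sum subarrays by a single sweep over
--     start positions: a running counter of sums of subarrays already ended
--     replaces A's per-sum grouping, sorting and binary search.
--     """
--     # prefix[k] = arr[0] + ... + arr[k-1]
--     prefix = [0]
--     for k in range(n):
--         prefix.append(prefix[-1] + arr[k])
--
--     ended = {}   # sum -> number of subarrays with end index < current start p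
--     total = 0
--     for p in range(1, n + 1):
--         # subarrays ending exactly at p-1 (1-based): starts q = 1 .. p-1
--         for q in range(1, p):
--             s = prefix[p - 1] - prefix[q - 1]
--             ended[s] = ended.get(s, 0) + 1
--         # subarrays starting at p: ends e = p .. n
--         for e in range(p, n + 1):
--             total += ended.get(prefix[e] - prefix[p - 1], 0)
--     return total
-- ===== Notes on version B (the rewrite author's own statement) =====
-- stated objective: alternative
-- what changed: Replaces A's per-sum grouping dict with sorted interval lists and bisect binary searches by a single sweep over start positions that maintains one running counter (sum -> number of subarrays already ended), so no interval lists, no sorting and no binary search remain.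
import Mathlib
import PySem

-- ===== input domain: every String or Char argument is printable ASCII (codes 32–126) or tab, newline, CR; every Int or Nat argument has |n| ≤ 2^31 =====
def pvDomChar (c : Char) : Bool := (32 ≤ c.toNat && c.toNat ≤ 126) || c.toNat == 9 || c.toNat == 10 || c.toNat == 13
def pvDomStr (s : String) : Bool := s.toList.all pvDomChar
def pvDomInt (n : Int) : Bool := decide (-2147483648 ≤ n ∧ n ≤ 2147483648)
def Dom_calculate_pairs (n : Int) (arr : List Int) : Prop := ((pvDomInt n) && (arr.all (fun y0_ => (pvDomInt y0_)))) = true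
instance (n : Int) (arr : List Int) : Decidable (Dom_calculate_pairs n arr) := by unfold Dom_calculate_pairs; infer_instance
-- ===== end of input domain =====

-- B replaces A's per-sum grouping + sorting + bisect by a single sweep over start
-- positions with one running counter (sum -> #subarrays already ended); return values
-- agree on all inputs where A returns (n ≤ len(arr)).

-- ===== PORT A =====
def calculate_pairs (n : Int) (arr : List Int) : Int :=
  -- sum_intervals[current_sum].append((i+1, j+1)) over the double loop
  let d : PySem.Dict Int (List (Int × Int)) :=
    (PySem.List.pyRange 0 n).foldl
      (fun d i =>
        ((PySem.List.pyRange i n).foldl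
          (fun (st : Int × PySem.Dict Int (List (Int × Int))) j =>
            let cs := st.1 + PySem.List.pyGetD arr j 0
            (cs, st.2.modify cs [] (fun l => l ++ [(i + 1, j + 1)])))
          (0, d)).2)
      PySem.Dict.empty
  -- for s in sum_intervals: …
  d.keys.foldl
    (fun total s =>
      let intervals := d.getD s []
      if intervals.length < 2 then total
      else
        -- intervals.sort(): lexicographic tuple sort
        let intervals := PySem.List.sorted2 intervals (fun p => p.1) (fun p => p.2) false
        let all_ends := PySem.List.sorted (intervals.map (fun p => p.2)) (fun x => x) false
        intervals.foldl
          (fun total p => total + (PySem.List.bisectLeft all_ends p.1 : Int))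
          total)
    0

-- ===== PORT B =====
def calculate_pairs_alt (n : Int) (arr : List Int) : Int :=
  -- prefix[k] = arr[0] + … + arr[k-1]
  let pref : List Int :=
    (PySem.List.pyRange 0 n).foldl
      (fun pr k => pr ++ [PySem.List.pyGetD pr (-1) 0 + PySem.List.pyGetD arr k 0]) [0]
  let res :=
    (PySem.List.pyRange 1 (n + 1)).foldl
      (fun (st : PySem.Dict Int Int × Int) p =>
        -- subarrays ending exactly at p-1: starts q = 1 .. p-1
        let ended :=
          (PySem.List.pyRange 1 p).foldl
            (fun d q =>
              let s := PySem.List.pyGetD pref (p - 1) 0 - PySem.List.pyGetD pref (q - 1) 0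
              d.insert s (d.getD s 0 + 1))
            st.1
        -- subarrays starting at p: ends e = p .. n
        let total :=
          (PySem.List.pyRange p (n + 1)).foldl
            (fun t e => t + ended.getD (PySem.List.pyGetD pref e 0 - PySem.List.pyGetD pref (p - 1) 0) 0)
            st.2
        (ended, total))
      (PySem.Dict.empty, 0)
  res.2

-- ===== PRECONDITION & SPEC =====
-- Python A raises IndexError at arr[j] as soon as n exceeds len(arr); it returns on every other input.
def Pre_calculate_pairs (n : Int) (arr : List Int) : Prop := n ≤ (arr.length : Int)
instance (n : Int) (arr : List Int) : Decidable (Pre_calculate_pairs n arr) := by unfold Pre_calculate_pairs; infer_instance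
def pvWitness_calculate_pairs : Int × List Int := (3, [1, 2, 1])
def Spec_calculate_pairs (n : Int) (arr : List Int) (out : Int) : Prop := out = calculate_pairs_alt n arr
instance (n : Int) (arr : List Int) (out : Int) : Decidable (Spec_calculate_pairs n arr out) := by unfold Spec_calculate_pairs; infer_instance

-- ===== CLAIM (what is proved, stated in full; the proofs are below) =====
def Claim_equal_calculate_pairs : Prop := ∀ (n : Int) (arr : List Int), Dom_calculate_pairs n arr → Pre_calculate_pairs n arr → Spec_calculate_pairs n arr (calculate_pairs n arr)

-- ===== LEMMAS AND PROOFS =====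

-- arr[t] with default 0 (both ports only read in-range indices on the claimed inputs)
def pvG (arr : List Int) (t : Int) : Int := PySem.List.pyGetD arr t 0
-- prefix sum arr[0] + … + arr[x-1]
def pvP (arr : List Int) (x : Int) : Int := ((PySem.List.pyRange 0 x).map (pvG arr)).sum
-- all subarrays as (sum, start, end), 1-based, in A's generation order
def pvTriples (n : Int) (arr : List Int) : List (Int × Int × Int) :=
  (PySem.List.pyRange 0 n).flatMap (fun i =>
    (PySem.List.pyRange i n).map (fun j => (pvP arr (j + 1) - pvP arr i, i + 1, j + 1)))
-- sums of the subarrays ending exactly at p-1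
def pvLst (arr : List Int) (p : Int) : List Int :=
  (PySem.List.pyRange 1 p).map (fun q => pvP arr (p - 1) - pvP arr (q - 1))
-- sums of all subarrays with end < p (added during sweep iterations 1..p)
def pvL (arr : List Int) (p : Int) : List Int :=
  (PySem.List.pyRange 1 (p + 1)).flatMap (pvLst arr)
-- the common value: B's sweep shape
def pvT (n : Int) (arr : List Int) : Int :=
  ((PySem.List.pyRange 1 (n + 1)).map (fun p =>
    ((PySem.List.pyRange p (n + 1)).map (fun e =>
      ((pvL arr p).count (pvP arr e - pvP arr (p - 1)) : Int))).sum)).sum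

-- ## generic list-sum utilities

lemma sum_flatMap_int {α : Type} (l : List α) (g : α → List Int) :
    (l.flatMap g).sum = (l.map (fun x => (g x).sum)).sum := by
  induction l with
  | nil => rfl
  | cons a t ih => simp [List.flatMap_cons, List.sum_append, ih]

lemma countP_int_sum {α : Type} (l : List α) (q : α → Bool) :
    ((l.countP q : Int)) = (l.map (fun x => if q x then (1:Int) else 0)).sum := by
  induction l with
  | nil => rfl
  | cons a t ih => by_cases h : q a <;> simp [h, ih] <;> ring

lemma sum_map_pyRange_shift (g : Int → Int) (a b : Int) :
    ((PySem.List.pyRange (a + 1) (b + 1)).map g).sum = ((PySem.List.pyRange a b).map (fun x => g (x + 1))).sum := by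
  rw [PySem.List.pyRange_one (a+1) (b+1), PySem.List.pyRange_one a b]
  have : b + 1 - (a + 1) = b - a := by ring
  rw [this, List.map_map, List.map_map]
  apply congrArg
  apply List.map_congr_left
  intro k _
  simp only [Function.comp]
  ring_nf

lemma sum_map_pyRange_pad (f : Int → Int) (a b A B : Int) (hA : A ≤ a) (hB : b ≤ B) (hab : a ≤ B) :
    ((PySem.List.pyRange a b).map f).sum
      = ((PySem.List.pyRange A B).map (fun x => if a ≤ x ∧ x < b then f x else 0)).sum := by
  by_cases h : a ≤ b
  · rw [PySem.List.pyRange_one_append A a B hA (le_trans h hB),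
        PySem.List.pyRange_one_append a b B h hB]
    simp only [List.map_append, List.sum_append]
    have h1 : ((PySem.List.pyRange A a).map (fun x => if a ≤ x ∧ x < b then f x else 0)).sum = 0 := by
      apply List.sum_eq_zero; intro x hx
      simp only [List.mem_map] at hx
      obtain ⟨y, hy, rfl⟩ := hx
      rw [PySem.List.mem_pyRange_one] at hy
      have hny : ¬ (a ≤ y ∧ y < b) := by omega
      simp [hny]
    have h2 : ((PySem.List.pyRange b B).map (fun x => if a ≤ x ∧ x < b then f x else 0)).sum = 0 := by
      apply List.sum_eq_zero; intro x hx
      simp only [List.mem_map] at hx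
      obtain ⟨y, hy, rfl⟩ := hx
      rw [PySem.List.mem_pyRange_one] at hy
      have hny : ¬ (a ≤ y ∧ y < b) := by omega
      simp [hny]
    have h3 : ((PySem.List.pyRange a b).map (fun x => if a ≤ x ∧ x < b then f x else 0)).sum
        = ((PySem.List.pyRange a b).map f).sum := by
      apply congrArg; apply List.map_congr_left
      intro x hx
      rw [PySem.List.mem_pyRange_one] at hx
      simp [hx]
    omega
  · have hnil : PySem.List.pyRange a b = [] := PySem.List.pyRange_one_eq_nil (by omega)
    rw [hnil]
    symm
    simp only [List.map_nil, List.sum_nil]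
    apply List.sum_eq_zero; intro x hx
    simp only [List.mem_map] at hx
    obtain ⟨y, _, rfl⟩ := hx
    have hny : ¬ (a ≤ y ∧ y < b) := by omega
    simp [hny]

lemma indicator_sum_nodup (S : List Int) (hS : S.Nodup) (c : Int) (v : Int) (hc : c ∈ S) :
    (S.map (fun s => if c = s then v else 0)).sum = v := by
  induction S with
  | nil => cases hc
  | cons a t ih =>
      simp only [List.nodup_cons] at hS
      rcases List.mem_cons.mp hc with h | h
      · subst h
        have : (t.map (fun s => if c = s then v else 0)).sum = 0 := by
          apply List.sum_eq_zero; intro x hx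
          simp only [List.mem_map] at hx
          obtain ⟨y, hy, rfl⟩ := hx
          have : c ≠ y := fun hcy => hS.1 (hcy ▸ hy)
          simp [this]
        simp [this]
      · have hne : c ≠ a := fun hca => hS.1 (hca ▸ h)
        simp [hne, ih hS.2 h]

lemma sum_over_groups {α : Type} (L : List α) (key : α → Int) (H : α → Int) :
    ((PySem.Set.ofList (L.map key)).map (fun s => (((L.filter (fun x => key x == s))).map H).sum)).sum
      = (L.map H).sum := by
  induction L using List.reverseRecOn with
  | nil => rfl
  | append_singleton M a ih =>
      have hmapa : (M ++ [a]).map key = M.map key ++ [key a] := by simp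
      rw [hmapa, PySem.Set.ofList_append_singleton]
      have step : ∀ s, (((M ++ [a]).filter (fun x => key x == s)).map H).sum
          = ((M.filter (fun x => key x == s)).map H).sum + (if key a = s then H a else 0) := by
        intro s
        rw [List.filter_append, List.map_append, List.sum_append]
        by_cases h : key a = s
        · simp [List.filter_cons, h]
        · have hb : (key a == s) = false := by simp [h]
          simp [List.filter_cons, hb, h]
      by_cases hmem : key a ∈ PySem.Set.ofList (M.map key)
      · rw [PySem.Set.add_of_mem hmem]
        have h1 : ((PySem.Set.ofList (M.map key)).map
              (fun s => (((M ++ [a]).filter (fun x => key x == s)).map H).sum)).sum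
            = ((PySem.Set.ofList (M.map key)).map
              (fun s => ((M.filter (fun x => key x == s)).map H).sum)).sum
              + ((PySem.Set.ofList (M.map key)).map (fun s => if key a = s then H a else 0)).sum := by
          rw [← PySem.List.sum_map_add_int]
          exact congrArg _ (List.map_congr_left (fun s _ => step s))
        rw [h1, ih, indicator_sum_nodup _ (PySem.Set.nodup_ofList _) _ _ hmem, List.map_append]
        simp
      · rw [PySem.Set.add_of_not_mem hmem]
        have hfilterM : M.filter (fun x => key x == key a) = [] := by
          rw [List.filter_eq_nil_iff]
          intro x hx hbeq
          exact hmem (by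
            rw [PySem.Set.mem_ofList]
            exact (beq_iff_eq.mp hbeq) ▸ List.mem_map_of_mem hx)
        have h2 : ([key a].map (fun s => (((M ++ [a]).filter (fun x => key x == s)).map H).sum)).sum
            = H a := by
          simp only [List.map_cons, List.map_nil, List.sum_cons, List.sum_nil]
          rw [step (key a), hfilterM]
          simp
        have h3 : ((PySem.Set.ofList (M.map key)).map
              (fun s => (((M ++ [a]).filter (fun x => key x == s)).map H).sum)).sum
            = (M.map H).sum := by
          rw [← ih]
          refine congrArg _ (List.map_congr_left (fun s hs => ?_))
          rw [step s]
          have hne : key a ≠ s := fun h => hmem (h ▸ hs)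
          simp [hne]
        rw [List.map_append, List.sum_append, h2, h3, List.map_append]
        simp

-- ## bisect_left on a (≤)-sorted list counts the elements below the probe
lemma bisectLeft_eq_countP (xs : List Int) (h : xs.Pairwise (· ≤ ·)) (x : Int) :
    PySem.List.bisectLeft xs x = xs.countP (fun e => decide (e < x)) := by
  obtain ⟨hle, hlt, hge⟩ := PySem.List.bisectLeft_spec xs x h
  set b := PySem.List.bisectLeft xs x with hb
  have hc : xs.countP (fun e => decide (e < x))
      = (xs.take b).countP (fun e => decide (e < x)) + (xs.drop b).countP (fun e => decide (e < x)) := by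
    rw [← List.countP_append, List.take_append_drop]
  have h1 : (xs.take b).countP (fun e => decide (e < x)) = (xs.take b).length := by
    apply List.countP_eq_length.mpr
    intro e he
    obtain ⟨k, hk, rfl⟩ := List.mem_iff_getElem.mp he
    rw [List.length_take] at hk
    have hkb : k < b := by omega
    have hkxs : k < xs.length := by omega
    have hlt' := hlt k hkxs hkb
    have hget : (xs.take b)[k] = xs[k] := List.getElem_take
    rw [hget]
    simpa using hlt'
  have hlen : (xs.take b).length = b := by
    rw [List.length_take]; omega
  have h2 : (xs.drop b).countP (fun e => decide (e < x)) = 0 := by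
    apply List.countP_eq_zero.mpr
    intro e he
    obtain ⟨k, hk, rfl⟩ := List.mem_iff_getElem.mp he
    rw [List.length_drop] at hk
    have hbk : b + k < xs.length := by omega
    have hge' := hge (b + k) hbk (by omega)
    have hget : (xs.drop b)[k] = xs[b + k] := by
      rw [List.getElem_drop]
    rw [hget]
    simpa using (by omega : ¬ xs[b + k] < x)
  omega

-- ## basic facts about pvP and pvTriples
lemma pvP_succ (arr : List Int) (x : Int) (hx : 0 ≤ x) :
    pvP arr (x + 1) = pvP arr x + pvG arr x := by
  unfold pvP
  rw [PySem.List.pyRange_one_succ_right hx]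
  simp [pvG]

lemma mem_pvTriples (n : Int) (arr : List Int) (z : Int × Int × Int) (hz : z ∈ pvTriples n arr) :
    1 ≤ z.2.1 ∧ z.2.1 ≤ z.2.2 ∧ z.2.2 ≤ n := by
  unfold pvTriples at hz
  simp only [List.mem_flatMap, List.mem_map] at hz
  obtain ⟨i, hi, j, hj, rfl⟩ := hz
  rw [PySem.List.mem_pyRange_one] at hi hj
  refine ⟨?_, ?_, ?_⟩ <;> dsimp only <;> omega

-- ## A-side: the dict-building double loop builds the modify-append fold over pvTriples
lemma A_inner (arr : List Int) (i : Int) (hi : 0 ≤ i) : ∀ (m : Nat) (d : PySem.Dict Int (List (Int × Int))),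
    ((PySem.List.pyRange i (i + (m : Int))).foldl
      (fun (st : Int × PySem.Dict Int (List (Int × Int))) j =>
        let cs := st.1 + PySem.List.pyGetD arr j 0
        (cs, st.2.modify cs [] (fun l => l ++ [(i + 1, j + 1)])))
      (0, d))
    = (pvP arr (i + (m : Int)) - pvP arr i,
       ((PySem.List.pyRange i (i + (m : Int))).map (fun j => (pvP arr (j + 1) - pvP arr i, (i + 1, j + 1)))).foldl
         (fun d p => d.modify p.1 [] (fun l => l ++ [p.2])) d) := by
  intro m
  induction m with
  | zero =>
      intro d
      have h0 : (i : Int) + ((0 : Nat) : Int) = i := by simp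
      rw [h0, PySem.List.pyRange_one_eq_nil (le_refl i)]
      simp
  | succ m ih =>
      intro d
      have hc : (i : Int) + ((m + 1 : Nat) : Int) = (i + (m : Int)) + 1 := by push_cast; ring
      rw [hc, PySem.List.pyRange_one_succ_right (by omega : i ≤ i + (m : Int))]
      rw [List.foldl_append, ih d, List.map_append, List.foldl_append]
      have hcs : pvP arr (i + (m : Int)) - pvP arr i + PySem.List.pyGetD arr (i + (m : Int)) 0
          = pvP arr ((i + (m : Int)) + 1) - pvP arr i := by
        rw [pvP_succ arr (i + (m : Int)) (by omega)]
        show _ = _ + PySem.List.pyGetD arr (i + (m : Int)) 0 - _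
        ring
      simp only [List.foldl_cons, List.foldl_nil, List.map_cons, List.map_nil]
      rw [hcs]

lemma foldl_flatMap_eq {α β σ : Type} (l : List α) (g : α → List β) (step : σ → β → σ) (init : σ) :
    (l.flatMap g).foldl step init = l.foldl (fun acc x => (g x).foldl step acc) init := by
  induction l generalizing init with
  | nil => rfl
  | cons a t ih => rw [List.flatMap_cons, List.foldl_append, List.foldl_cons, ih]

lemma A_dict (n : Int) (arr : List Int) :
    ((PySem.List.pyRange 0 n).foldl
      (fun d i =>
        ((PySem.List.pyRange i n).foldl
          (fun (st : Int × PySem.Dict Int (List (Int × Int))) j =>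
            let cs := st.1 + PySem.List.pyGetD arr j 0
            (cs, st.2.modify cs [] (fun l => l ++ [(i + 1, j + 1)])))
          (0, d)).2)
      PySem.Dict.empty)
    = (pvTriples n arr).foldl (fun d p => d.modify p.1 [] (fun l => l ++ [p.2])) PySem.Dict.empty := by
  unfold pvTriples
  rw [foldl_flatMap_eq]
  apply PySem.List.foldl_congr_mem
  intro d i hi
  rw [PySem.List.mem_pyRange_one] at hi
  have hin : (i : Int) + (((n - i).toNat : Nat) : Int) = n := by omega
  have h := A_inner arr i hi.1 (n - i).toNat d
  rw [hin] at h
  rw [h]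

-- ## B-side: prefix list, running counter, and the sweep invariant
lemma pyGetD_append_last (l : List Int) (z d : Int) : PySem.List.pyGetD (l ++ [z]) (-1) d = z := by
  simp [PySem.List.pyGetD, PySem.List.pyGet?, PySem.List.pyIdx?]

lemma B_prefix (arr : List Int) : ∀ (m : Nat),
    ((PySem.List.pyRange 0 (m : Int)).foldl
        (fun pr k => pr ++ [PySem.List.pyGetD pr (-1) 0 + PySem.List.pyGetD arr k 0]) [0])
      = (PySem.List.pyRange 0 ((m : Int) + 1)).map (pvP arr) := by
  intro m
  induction m with
  | zero =>
      rw [show ((0 : Nat) : Int) = 0 from rfl, PySem.List.pyRange_one_eq_nil (le_refl 0)]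
      rw [show (0 : Int) + 1 = 0 + 1 from rfl, PySem.List.pyRange_one_singleton]
      have h0 : pvP arr 0 = 0 := by
        unfold pvP
        rw [PySem.List.pyRange_one_eq_nil (le_refl 0)]
        rfl
      simp [h0]
  | succ m ih =>
      have hc : ((m + 1 : Nat) : Int) = (m : Int) + 1 := by push_cast; ring
      rw [hc, PySem.List.pyRange_one_succ_right (by positivity : (0:Int) ≤ (m : Int))]
      rw [List.foldl_append, ih, List.foldl_cons, List.foldl_nil]
      rw [PySem.List.pyRange_one_succ_right (by positivity : (0:Int) ≤ (m : Int)), List.map_append,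
          List.map_singleton, pyGetD_append_last]
      rw [PySem.List.pyRange_one_succ_right (by omega : (0:Int) ≤ (m : Int) + 1), List.map_append,
          List.map_singleton]
      rw [pvP_succ arr (m : Int) (by positivity)]
      rw [PySem.List.pyRange_one_succ_right (by positivity : (0:Int) ≤ (m : Int)), List.map_append,
          List.map_singleton]
      simp [pvG, List.append_assoc]

lemma insert_fold_getD (l : List Int) (f : Int → Int) (d : PySem.Dict Int Int) (v : Int) :
    (l.foldl (fun d q => d.insert (f q) (d.getD (f q) 0 + 1)) d).getD v 0
      = d.getD v 0 + ((l.map f).count v : Int) := by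
  induction l generalizing d with
  | nil => simp
  | cons a t ih =>
      rw [List.foldl_cons, ih, List.map_cons]
      rw [PySem.Dict.getD_insert]
      by_cases h : v = f a
      · rw [if_pos h, h]
        have hcnt : (f a :: List.map f t).count (f a) = (List.map f t).count (f a) + 1 := by simp
        rw [hcnt]
        push_cast
        ring
      · rw [if_neg h]
        have hcnt : (f a :: List.map f t).count v = (List.map f t).count v := by
          have hb : (f a == v) = false := by simp [Ne.symm h]
          simp [List.count_cons, hb]
        rw [hcnt]

lemma pvL_zero (arr : List Int) : pvL arr 0 = [] := by
  unfold pvL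
  rw [show (0 : Int) + 1 = 1 from rfl, PySem.List.pyRange_one_eq_nil (le_refl 1)]
  rfl

lemma pvL_succ (arr : List Int) (q : Int) (hq : 0 ≤ q) :
    pvL arr (q + 1) = pvL arr q ++ pvLst arr (q + 1) := by
  unfold pvL
  rw [PySem.List.pyRange_one_succ_right (by omega : (1:Int) ≤ q + 1), List.flatMap_append]
  simp

-- B's sweep step, with the prefix list already rewritten to its closed form
def pvBStep (n : Int) (arr : List Int) : PySem.Dict Int Int × Int → Int → PySem.Dict Int Int × Int :=
  fun st p =>
    ((PySem.List.pyRange 1 p).foldl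
      (fun d q =>
        d.insert (PySem.List.pyGetD ((PySem.List.pyRange 0 (n + 1)).map (pvP arr)) (p - 1) 0
            - PySem.List.pyGetD ((PySem.List.pyRange 0 (n + 1)).map (pvP arr)) (q - 1) 0)
          (d.getD (PySem.List.pyGetD ((PySem.List.pyRange 0 (n + 1)).map (pvP arr)) (p - 1) 0
            - PySem.List.pyGetD ((PySem.List.pyRange 0 (n + 1)).map (pvP arr)) (q - 1) 0) 0 + 1)) st.1,
     (PySem.List.pyRange p (n + 1)).foldl
      (fun t e => t + ((PySem.List.pyRange 1 p).foldl
        (fun d q =>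
          d.insert (PySem.List.pyGetD ((PySem.List.pyRange 0 (n + 1)).map (pvP arr)) (p - 1) 0
              - PySem.List.pyGetD ((PySem.List.pyRange 0 (n + 1)).map (pvP arr)) (q - 1) 0)
            (d.getD (PySem.List.pyGetD ((PySem.List.pyRange 0 (n + 1)).map (pvP arr)) (p - 1) 0
              - PySem.List.pyGetD ((PySem.List.pyRange 0 (n + 1)).map (pvP arr)) (q - 1) 0) 0 + 1)) st.1).getD
          (PySem.List.pyGetD ((PySem.List.pyRange 0 (n + 1)).map (pvP arr)) e 0
            - PySem.List.pyGetD ((PySem.List.pyRange 0 (n + 1)).map (pvP arr)) (p - 1) 0) 0) st.2)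

lemma B_step (n : Int) (arr : List Int) (p : Int) (hp1 : 1 ≤ p) (hpn : p ≤ n)
    (st : PySem.Dict Int Int × Int) (hD : ∀ s, st.1.getD s 0 = ((pvL arr (p - 1)).count s : Int)) :
    (∀ v, (pvBStep n arr st p).1.getD v 0 = ((pvL arr p).count v : Int))
    ∧ (pvBStep n arr st p).2
      = st.2 + ((PySem.List.pyRange p (n + 1)).map (fun e =>
          ((pvL arr p).count (pvP arr e - pvP arr (p - 1)) : Int))).sum := by
  have hlook : ∀ x : Int, 0 ≤ x → x ≤ n →
      PySem.List.pyGetD ((PySem.List.pyRange 0 (n + 1)).map (pvP arr)) x 0 = pvP arr x :=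
    fun x h0 h1 => PySem.List.pyGetD_map_pyRange_of_nonneg (pvP arr) (n + 1) x 0 h0 (by omega)
  have hkeys : ((PySem.List.pyRange 1 p).map (fun q =>
      PySem.List.pyGetD ((PySem.List.pyRange 0 (n + 1)).map (pvP arr)) (p - 1) 0
        - PySem.List.pyGetD ((PySem.List.pyRange 0 (n + 1)).map (pvP arr)) (q - 1) 0)) = pvLst arr p := by
    unfold pvLst
    apply List.map_congr_left
    intro q hq
    rw [PySem.List.mem_pyRange_one] at hq
    rw [hlook (p - 1) (by omega) (by omega), hlook (q - 1) (by omega) (by omega)]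
  have hsplit : pvL arr p = pvL arr (p - 1) ++ pvLst arr p := by
    have h := pvL_succ arr (p - 1) (by omega)
    rw [show p - 1 + 1 = p from by ring] at h
    exact h
  have hend : ∀ v, ((PySem.List.pyRange 1 p).foldl
      (fun d q =>
        d.insert (PySem.List.pyGetD ((PySem.List.pyRange 0 (n + 1)).map (pvP arr)) (p - 1) 0
            - PySem.List.pyGetD ((PySem.List.pyRange 0 (n + 1)).map (pvP arr)) (q - 1) 0)
          (d.getD (PySem.List.pyGetD ((PySem.List.pyRange 0 (n + 1)).map (pvP arr)) (p - 1) 0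
            - PySem.List.pyGetD ((PySem.List.pyRange 0 (n + 1)).map (pvP arr)) (q - 1) 0) 0 + 1))
      st.1).getD v 0 = ((pvL arr p).count v : Int) := by
    intro v
    rw [insert_fold_getD (PySem.List.pyRange 1 p)
      (fun q => PySem.List.pyGetD ((PySem.List.pyRange 0 (n + 1)).map (pvP arr)) (p - 1) 0
        - PySem.List.pyGetD ((PySem.List.pyRange 0 (n + 1)).map (pvP arr)) (q - 1) 0) st.1 v]
    rw [hkeys, hD v, hsplit, List.count_append]
    push_cast
    ring
  constructor
  · intro v
    unfold pvBStep
    dsimp only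
    exact hend v
  · unfold pvBStep
    dsimp only
    rw [PySem.List.foldl_add]
    congr 1
    apply congrArg
    apply List.map_congr_left
    intro e he
    rw [PySem.List.mem_pyRange_one] at he
    rw [hlook e (by omega) (by omega), hend, hlook (p - 1) (by omega) (by omega)]

lemma B_loop (n : Int) (arr : List Int) (hn : 0 ≤ n) : ∀ (m : Nat), (m : Int) ≤ n →
    (∀ s : Int, (((PySem.List.pyRange 1 ((m : Int) + 1)).foldl (pvBStep n arr)
        (PySem.Dict.empty, 0)).1.getD s 0 = ((pvL arr (m : Int)).count s : Int)))
    ∧ (((PySem.List.pyRange 1 ((m : Int) + 1)).foldl (pvBStep n arr) (PySem.Dict.empty, 0)).2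
        = ((PySem.List.pyRange 1 ((m : Int) + 1)).map (fun p =>
            ((PySem.List.pyRange p (n + 1)).map (fun e =>
              ((pvL arr p).count (pvP arr e - pvP arr (p - 1)) : Int))).sum)).sum) := by
  intro m
  induction m with
  | zero =>
      intro _
      simp only [Nat.cast_zero]
      rw [show (0 : Int) + 1 = 1 from rfl, PySem.List.pyRange_one_eq_nil (le_refl 1)]
      constructor
      · intro s
        rw [pvL_zero]
        simp [PySem.Dict.getD_empty]
      · rfl
  | succ m ih =>
      intro hm
      have hc2 : ((m + 1 : Nat) : Int) = (m : Int) + 1 := by push_cast; ring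
      rw [hc2] at hm ⊢
      rw [PySem.List.pyRange_one_succ_right (by omega : (1:Int) ≤ (m : Int) + 1),
          List.foldl_append, List.foldl_cons, List.foldl_nil]
      obtain ⟨hD, hT⟩ := ih (by omega)
      have hstep := B_step n arr ((m : Int) + 1) (by omega) (by omega)
        ((PySem.List.pyRange 1 ((m : Int) + 1)).foldl (pvBStep n arr) (PySem.Dict.empty, 0))
        (by
          intro s
          rw [show (m : Int) + 1 - 1 = (m : Int) from by ring]
          exact hD s)
      constructor
      · intro v
        exact hstep.1 v
      · rw [hstep.2, hT, List.map_append, List.sum_append, List.map_singleton, List.sum_cons,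
            List.sum_nil, add_zero]

-- ## B equals the common value
lemma LB (n : Int) (arr : List Int) : calculate_pairs_alt n arr = pvT n arr := by
  by_cases hn : 0 ≤ n
  · have hpref : ((PySem.List.pyRange 0 n).foldl
        (fun pr k => pr ++ [PySem.List.pyGetD pr (-1) 0 + PySem.List.pyGetD arr k 0]) [0])
        = (PySem.List.pyRange 0 (n + 1)).map (pvP arr) := by
      have h := B_prefix arr n.toNat
      rw [Int.toNat_of_nonneg hn] at h
      exact h
    have hmain := B_loop n arr hn n.toNat (by omega)
    rw [Int.toNat_of_nonneg hn] at hmain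
    obtain ⟨_, hT⟩ := hmain
    simp only [calculate_pairs_alt]
    rw [hpref]
    show ((PySem.List.pyRange 1 (n + 1)).foldl (pvBStep n arr) (PySem.Dict.empty, 0)).2 = pvT n arr
    rw [hT]
    rfl
  · have h1 : PySem.List.pyRange 1 (n + 1) = [] := PySem.List.pyRange_one_eq_nil (by omega)
    simp only [calculate_pairs_alt, pvT, h1]
    rfl

-- ## core combinatorial identity (Fubini): start-major count = end-major count
lemma countP_or_split {α : Type} (l : List α) (A B : α → Bool)
    (h : ∀ x ∈ l, ¬(A x = true ∧ B x = true)) :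
    l.countP (fun x => A x || B x) = l.countP A + l.countP B := by
  induction l with
  | nil => rfl
  | cons a t ih =>
      rw [List.countP_cons, List.countP_cons, List.countP_cons,
          ih (fun x hx => h x (List.mem_cons_of_mem a hx))]
      have ha := h a List.mem_cons_self
      by_cases hA : A a <;> by_cases hB : B a <;> simp [hA, hB] at ha ⊢ <;> omega

lemma sum_map_pyRange_single (t : Int → Int) (c : Int) : ∀ (k : Nat) (a : Int),
    ((PySem.List.pyRange a (a + (k : Int))).map (fun j => if j = c then t j else 0)).sum
      = if a ≤ c ∧ c < a + (k : Int) then t c else 0 := by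
  intro k
  induction k with
  | zero =>
      intro a
      rw [show (a : Int) + ((0 : Nat) : Int) = a from by simp, PySem.List.pyRange_one_eq_nil (le_refl a)]
      have hx : ¬(a ≤ c ∧ c < a) := by omega
      simp [hx]
  | succ k ih =>
      intro a
      have hcast : (a : Int) + ((k + 1 : Nat) : Int) = (a + 1) + (k : Int) := by push_cast; ring
      rw [hcast, PySem.List.pyRange_one_cons (by omega : a < a + 1 + (k : Int))]
      rw [List.map_cons, List.sum_cons, ih (a + 1)]
      by_cases h1 : a = c
      · subst h1
        have hx : ¬(a + 1 ≤ a ∧ a < a + 1 + (k : Int)) := by omega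
        have hy : a ≤ a ∧ a < a + 1 + (k : Int) := by omega
        simp [hx, hy]
      · have hiff : (a + 1 ≤ c ∧ c < a + 1 + (k : Int)) ↔ (a ≤ c ∧ c < a + 1 + (k : Int)) := by omega
        rw [if_neg h1, if_congr hiff rfl rfl, zero_add]

lemma core_slice (n : Int) (arr : List Int) (p s : Int) (h1 : 1 ≤ p) (h2 : p ≤ n) :
    (((pvTriples n arr).countP (fun z => decide (z.2.2 = p) && (z.1 == s))) : Int)
      = ((pvLst arr (p + 1)).count s : Int) := by
  rw [countP_int_sum]
  unfold pvTriples
  rw [List.map_flatMap, sum_flatMap_int]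
  have hR : ((pvLst arr (p + 1)).count s : Int)
      = ((PySem.List.pyRange 1 (p + 1)).map (fun q =>
          if pvP arr p - pvP arr (q - 1) = s then (1:Int) else 0)).sum := by
    rw [List.count_eq_countP, countP_int_sum]
    unfold pvLst
    rw [List.map_map]
    apply congrArg
    apply List.map_congr_left
    intro q _
    simp only [Function.comp]
    rw [show p + 1 - 1 = p from by ring]
    by_cases hE : pvP arr p - pvP arr (q - 1) = s
    · simp [hE]
    · simp [hE]
  rw [hR]
  rw [show PySem.List.pyRange 1 (p + 1) = PySem.List.pyRange (0 + 1) (p + 1) from by norm_num]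
  rw [sum_map_pyRange_shift]
  have hRR : ((PySem.List.pyRange 0 p).map (fun x =>
        if pvP arr p - pvP arr (x + 1 - 1) = s then (1:Int) else 0)).sum
      = ((PySem.List.pyRange 0 p).map (fun x =>
        if pvP arr p - pvP arr x = s then (1:Int) else 0)).sum := by
    apply congrArg
    apply List.map_congr_left
    intro x _
    rw [show x + 1 - 1 = x from by ring]
  rw [hRR]
  rw [sum_map_pyRange_pad (fun x => if pvP arr p - pvP arr x = s then (1:Int) else 0)
    0 p 0 n (le_refl 0) h2 (by omega)]
  apply congrArg
  apply List.map_congr_left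
  intro i hi
  rw [PySem.List.mem_pyRange_one] at hi
  rw [List.map_map]
  have hL : ((PySem.List.pyRange i n).map ((fun x => if (decide (x.2.2 = p) && (x.1 == s)) then (1:Int) else 0)
        ∘ (fun j => (pvP arr (j + 1) - pvP arr i, i + 1, j + 1)))).sum
      = ((PySem.List.pyRange i n).map (fun j => if j = p - 1 then
          (if pvP arr (j + 1) - pvP arr i = s then (1:Int) else 0) else 0)).sum := by
    apply congrArg
    apply List.map_congr_left
    intro j _
    simp only [Function.comp]
    by_cases hE : pvP arr (j + 1) - pvP arr i = s
    · simp only [hE, beq_self_eq_true, Bool.and_true, decide_eq_true_eq]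
      split_ifs <;> simp <;> omega
    · have hb : (pvP arr (j + 1) - pvP arr i == s) = false := by simp [hE]
      simp [hb, hE]
  rw [hL]
  have hni : (i : Int) + (((n - i).toNat : Nat) : Int) = n := by omega
  rw [show PySem.List.pyRange i n = PySem.List.pyRange i (i + (((n - i).toNat : Nat) : Int)) from by rw [hni]]
  rw [sum_map_pyRange_single (fun j => if pvP arr (j + 1) - pvP arr i = s then (1:Int) else 0)
    (p - 1) ((n - i).toNat) i]
  rw [hni, show p - 1 + 1 = p from by ring]
  by_cases hE : pvP arr p - pvP arr i = s
  · simp only [hE]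
    split_ifs <;> omega
  · split_ifs <;> omega

lemma core (n : Int) (arr : List Int) : ∀ (k : Nat) (p s : Int), p = 1 + (k : Int) → p ≤ n →
    (((pvTriples n arr).countP (fun z => decide (z.2.2 < p) && (z.1 == s))) : Int)
      = ((pvL arr p).count s : Int) := by
  intro k
  induction k with
  | zero =>
      intro p s hp hpn
      have hp1 : p = 1 := by simpa using hp
      subst hp1
      have hL : (pvTriples n arr).countP (fun z => decide (z.2.2 < 1) && (z.1 == s)) = 0 := by
        apply List.countP_eq_zero.mpr
        intro z hz
        have hm := mem_pvTriples n arr z hz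
        have hlt : ¬(z.2.2 < 1) := by omega
        simp [hlt]
      rw [hL]
      have hR : pvL arr 1 = [] := by
        have h := pvL_succ arr 0 (le_refl 0)
        rw [show (0:Int) + 1 = 1 from by ring] at h
        rw [h, pvL_zero]
        unfold pvLst
        rw [PySem.List.pyRange_one_eq_nil (le_refl 1)]
        rfl
      rw [hR]
      rfl
  | succ k ih =>
      intro p s hp hpn
      have hpk : p = 1 + (k : Int) + 1 := by push_cast at hp; omega
      have hsplitL : (pvTriples n arr).countP (fun z => decide (z.2.2 < p) && (z.1 == s))
          = (pvTriples n arr).countP (fun z => decide (z.2.2 < p - 1) && (z.1 == s))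
            + (pvTriples n arr).countP (fun z => decide (z.2.2 = p - 1) && (z.1 == s)) := by
        rw [← countP_or_split _ _ _ (by
          intro z _ hboth
          obtain ⟨hA, hB⟩ := hboth
          simp only [Bool.and_eq_true, decide_eq_true_eq] at hA hB
          omega)]
        apply List.countP_congr
        intro z _
        by_cases hA : z.2.2 < p - 1 <;> by_cases hB : z.2.2 = p - 1 <;>
          by_cases hS : (z.1 == s) = true <;> simp [hA, hB, hS] <;> omega
      have hRsplit : pvL arr p = pvL arr (p - 1) ++ pvLst arr p := by
        have h := pvL_succ arr (p - 1) (by omega)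
        rw [show p - 1 + 1 = p from by ring] at h
        exact h
      have hslice := core_slice n arr (p - 1) s (by omega) (by omega)
      rw [show p - 1 + 1 = p from by ring] at hslice
      have hih := ih (p - 1) s (by omega) (by omega)
      rw [hsplitL, hRsplit, List.count_append]
      push_cast
      push_cast at hih hslice
      omega

lemma core' (n : Int) (arr : List Int) (p s : Int) (h1 : 1 ≤ p) (h2 : p ≤ n) :
    (((pvTriples n arr).countP (fun z => decide (z.2.2 < p) && (z.1 == s))) : Int)
      = ((pvL arr p).count s : Int) :=
  core n arr (p - 1).toNat p s (by omega) h2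

-- ## A equals the common value
def pvH (T : List (Int × Int × Int)) : Int × Int × Int → Int :=
  fun x => ((T.countP (fun z => decide (z.2.2 < x.2.1) && (z.1 == x.1))) : Int)

lemma triples_sum_expand (n : Int) (arr : List Int) (F : Int × Int × Int → Int) :
    ((pvTriples n arr).map F).sum
      = ((PySem.List.pyRange 0 n).map (fun i =>
          ((PySem.List.pyRange i n).map (fun j => F (pvP arr (j + 1) - pvP arr i, i + 1, j + 1))).sum)).sum := by
  unfold pvTriples
  rw [List.map_flatMap, sum_flatMap_int]
  apply congrArg
  apply List.map_congr_left
  intro i _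
  rw [List.map_map]
  rfl

lemma LA (n : Int) (arr : List Int) : calculate_pairs n arr = pvT n arr := by
  simp only [calculate_pairs]
  rw [A_dict]
  have hgetD : ∀ s : Int, ((pvTriples n arr).foldl (fun d p => d.modify p.1 [] (fun l => l ++ [p.2])) PySem.Dict.empty).getD s []
      = ((pvTriples n arr).filter (fun x => x.1 == s)).map (fun x => x.2) := by
    intro s
    rw [PySem.Dict.getD_foldl_modify_append (pvTriples n arr) PySem.Dict.empty s, PySem.Dict.getD_empty]
    simp
  have hkeys : ((pvTriples n arr).foldl (fun d p => d.modify p.1 [] (fun l => l ++ [p.2])) PySem.Dict.empty).keys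
      = PySem.Set.ofList ((pvTriples n arr).map Prod.fst) := by
    rw [PySem.Dict.keys_foldl_modify_key (pvTriples n arr) Prod.fst [] (fun d x => fun l => l ++ [x.2]) PySem.Dict.empty,
        PySem.Dict.keys_empty, PySem.Set.update_nil_left]
  have hbody : ∀ (total s : Int),
      (let intervals := ((pvTriples n arr).foldl (fun d p => d.modify p.1 [] (fun l => l ++ [p.2])) PySem.Dict.empty).getD s []
       if intervals.length < 2 then total
       else
         let intervals := PySem.List.sorted2 intervals (fun p => p.1) (fun p => p.2) false
         let all_ends := PySem.List.sorted (intervals.map (fun p => p.2)) (fun x => x) false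
         intervals.foldl (fun total p => total + (PySem.List.bisectLeft all_ends p.1 : Int)) total)
      = total + (((pvTriples n arr).filter (fun x => x.1 == s)).map (pvH (pvTriples n arr))).sum := by
    intro total s
    set g : List (Int × Int) := ((pvTriples n arr).filter (fun x => x.1 == s)).map (fun x => x.2) with hg
    rw [hgetD s, ← hg]
    show (if g.length < 2 then total
      else
        (PySem.List.sorted2 g (fun p => p.1) (fun p => p.2) false).foldl
          (fun total p => total + (PySem.List.bisectLeft (PySem.List.sorted
            ((PySem.List.sorted2 g (fun p => p.1) (fun p => p.2) false).map (fun p => p.2)) (fun x => x) false) p.1 : Int)) total)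
      = total + (((pvTriples n arr).filter (fun x => x.1 == s)).map (pvH (pvTriples n arr))).sum
    by_cases hlen : g.length < 2
    · rw [if_pos hlen]
      have hzero : (((pvTriples n arr).filter (fun x => x.1 == s)).map (pvH (pvTriples n arr))).sum = 0 := by
        rcases hfil : (pvTriples n arr).filter (fun x => x.1 == s) with _ | ⟨x, rest⟩
        · rw [hfil]
          rfl
        · have hlg := hlen
          rw [hg, List.length_map, hfil] at hlg
          have hrest : rest = [] := by
            cases rest with
            | nil => rfl
            | cons y t => simp at hlg
          subst hrest
          have hxmem : x ∈ (pvTriples n arr).filter (fun x => x.1 == s) := by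
            rw [hfil]
            exact List.mem_cons_self
          have hxT : x ∈ pvTriples n arr := List.mem_of_mem_filter hxmem
          have hxs : x.1 = s := by simpa using List.of_mem_filter hxmem
          have hse := (mem_pvTriples n arr x hxT).2.1
          have hHx : pvH (pvTriples n arr) x = 0 := by
            unfold pvH
            have h1 : ((pvTriples n arr).countP (fun z => decide (z.2.2 < x.2.1) && (z.1 == x.1)))
                = (((pvTriples n arr).filter (fun z => z.1 == x.1)).countP (fun z => decide (z.2.2 < x.2.1))) := by
              rw [List.countP_filter]
            rw [h1]
            have hfx : (pvTriples n arr).filter (fun z => z.1 == x.1) = [x] := by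
              rw [hxs]
              exact hfil
            rw [hfx]
            have hlt : ¬(x.2.2 < x.2.1) := by omega
            simp [hlt]
          rw [hfil]
          simp [hHx]
      rw [hzero, add_zero]
    · rw [if_neg hlen]
      set gs := PySem.List.sorted2 g (fun p => p.1) (fun p => p.2) false with hgs
      set ends := PySem.List.sorted (gs.map (fun p => p.2)) (fun x => x) false with hends
      have hperm : gs.Perm g := by
        rw [hgs]
        exact PySem.List.sorted2_perm g (fun p => p.1) (fun p => p.2) false
      have hpw : ends.Pairwise (· ≤ ·) := by
        rw [hends]
        simpa using PySem.List.sorted_pairwise (gs.map (fun p => p.2)) (fun x => x)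
      have hpermE : ends.Perm (g.map (fun p => p.2)) := by
        rw [hends]
        exact (PySem.List.sorted_perm (gs.map (fun p => p.2)) (fun x => x) false).trans (hperm.map _)
      rw [PySem.List.foldl_add]
      congr 1
      have hsum1 : (gs.map (fun y => (PySem.List.bisectLeft ends y.1 : Int))).sum
          = (g.map (fun y => (PySem.List.bisectLeft ends y.1 : Int))).sum := (hperm.map _).sum_eq
      rw [hsum1, hg, List.map_map]
      apply congrArg
      apply List.map_congr_left
      intro x hx
      have hxT : x ∈ pvTriples n arr := List.mem_of_mem_filter hx
      have hxs : x.1 = s := by simpa using List.of_mem_filter hx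
      simp only [Function.comp]
      rw [bisectLeft_eq_countP ends hpw, List.Perm.countP_eq _ hpermE, hg, List.map_map,
          List.countP_map, List.countP_filter]
      unfold pvH
      rw [hxs]
      rfl
  rw [PySem.List.foldl_congr_mem _ _
      (fun (total s : Int) => total + (((pvTriples n arr).filter (fun x => x.1 == s)).map (pvH (pvTriples n arr))).sum)
      0 (fun acc x _ => hbody acc x)]
  rw [PySem.List.foldl_add, zero_add, hkeys]
  rw [sum_over_groups (pvTriples n arr) Prod.fst (pvH (pvTriples n arr))]
  rw [triples_sum_expand]
  have hN : ((PySem.List.pyRange 0 n).map (fun i =>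
        ((PySem.List.pyRange i n).map (fun j => pvH (pvTriples n arr) (pvP arr (j + 1) - pvP arr i, i + 1, j + 1))).sum)).sum
      = ((PySem.List.pyRange 0 n).map (fun i =>
        ((PySem.List.pyRange i n).map (fun j => ((pvL arr (i + 1)).count (pvP arr (j + 1) - pvP arr i) : Int))).sum)).sum := by
    apply congrArg
    apply List.map_congr_left
    intro i hi
    rw [PySem.List.mem_pyRange_one] at hi
    apply congrArg
    apply List.map_congr_left
    intro j hj
    rw [PySem.List.mem_pyRange_one] at hj
    unfold pvH
    exact core' n arr (i + 1) (pvP arr (j + 1) - pvP arr i) (by omega) (by omega)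
  have hPT : pvT n arr = ((PySem.List.pyRange 0 n).map (fun i =>
        ((PySem.List.pyRange i n).map (fun j => ((pvL arr (i + 1)).count (pvP arr (j + 1) - pvP arr i) : Int))).sum)).sum := by
    unfold pvT
    rw [show PySem.List.pyRange 1 (n + 1) = PySem.List.pyRange (0 + 1) (n + 1) from by norm_num,
        sum_map_pyRange_shift]
    apply congrArg
    apply List.map_congr_left
    intro x _
    rw [sum_map_pyRange_shift]
    apply congrArg
    apply List.map_congr_left
    intro y _
    rw [show (x : Int) + 1 - 1 = x from by ring]
  rw [hPT]
  exact hN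

-- ===== VERDICT (by name: the statement is the Claim_ definition above) =====
theorem calculate_pairs_spec : Claim_equal_calculate_pairs := by
  intro n arr _ _
  unfold Spec_calculate_pairs
  rw [LA, LB]
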